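-- pv_equiv track=rewrite | github.com/nam-spec/AISC | ciphers/poly_vernam.py | extend_key
-- ===== SOURCE A (Python) =====
-- def extend_key(key, length):
--     key = key.lower()
--     clean = [c for c in key if c.isalpha()]
--     out = ""
--     i = 0
--     while len(out) < length:
--         out += clean[i % len(clean)]
--         i += 1
--     return out
-- ===== SOURCE B (Python) =====
-- def extend_key(key, length):
--     if length <= 0:
--         return ""
--     clean = [c for c in key.lower() if c.isalpha()]
--     reps = -(-length // len(clean))  # ceil(length/len); ZeroDivisionError if no alpha chars, like A
--     return ("".join(clean) * reps)[:length]
-- ===== Notes on version B (the rewrite author's own statement) =====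
-- stated objective: faster
-- what changed: Replaces the incremental while loop with modulo indexing and quadratic string concatenation by a closed-form repeat-then-truncate: build ceil(length/len(clean)) copies of the cleaned key in one multiplication and slice to length.
import Mathlib
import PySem

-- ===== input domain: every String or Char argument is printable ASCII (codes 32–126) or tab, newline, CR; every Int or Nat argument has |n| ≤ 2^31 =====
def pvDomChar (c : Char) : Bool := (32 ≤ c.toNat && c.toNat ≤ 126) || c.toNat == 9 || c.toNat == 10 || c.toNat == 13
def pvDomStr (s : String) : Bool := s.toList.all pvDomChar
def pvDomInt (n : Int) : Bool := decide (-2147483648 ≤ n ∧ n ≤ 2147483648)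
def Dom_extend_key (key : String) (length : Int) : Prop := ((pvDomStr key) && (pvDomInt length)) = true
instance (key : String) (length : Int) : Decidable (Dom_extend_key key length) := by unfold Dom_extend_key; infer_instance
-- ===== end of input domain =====

-- B replaces A's incremental modulo-indexed while loop by a closed-form
-- repeat-then-truncate (ceil(length/len(clean)) copies of the cleaned key, sliced to length).

-- ===== PORT A =====
-- The while loop appends exactly one character per iteration, so `length.toNat` fuel
-- is exactly the number of iterations Python performs; the guard is checked each step.
def extendKeyLoopA (clean : List Char) (length : Int) : Nat → List Char → Nat → List Char
  | 0, out, _ => out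
  | fuel + 1, out, i =>
    if (out.length : Int) < length then
      extendKeyLoopA clean length fuel (out ++ [clean.getD (i % clean.length) default]) (i + 1)
    else out

def extend_key (key : String) (length : Int) : String :=
  let clean := (PySem.Str.lower key).toList.filter PySem.Chars.isalpha
  String.ofList (extendKeyLoopA clean length length.toNat [] 0)

-- ===== PORT B =====
def extend_key_alt (key : String) (length : Int) : String :=
  if length ≤ 0 then "" else
    let clean := (PySem.Str.lower key).toList.filter PySem.Chars.isalpha
    let reps := -(PySem.Int.floordiv (-length) (clean.length : Int))
    String.ofList (PySem.List.slice (PySem.List.pyRepeat clean reps) none (some length))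

-- ===== PRECONDITION & SPEC =====
-- Pre_ excludes exactly the inputs where Python A raises ZeroDivisionError:
-- length > 0 while the key contains no alphabetic character (B raises there too).
def Pre_extend_key (key : String) (length : Int) : Prop :=
  length ≤ 0 ∨ (PySem.Str.lower key).toList.filter PySem.Chars.isalpha ≠ []
instance (key : String) (length : Int) : Decidable (Pre_extend_key key length) := by
  unfold Pre_extend_key; infer_instance

def pvWitness_extend_key : String × Int := ("Ab c!", 7)

def Spec_extend_key (key : String) (length : Int) (out : String) : Prop := out = extend_key_alt key length
instance (key : String) (length : Int) (out : String) : Decidable (Spec_extend_key key length out) := by unfold Spec_extend_key; infer_instance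

-- ===== CLAIM (what is proved, stated in full; the proofs are below) =====
def Claim_equal_extend_key : Prop := ∀ (key : String) (length : Int), Dom_extend_key key length → Pre_extend_key key length → Spec_extend_key key length (extend_key key length)

-- ===== LEMMAS AND PROOFS =====

-- the cyclic stream clean[i%n], clean[(i+1)%n], … of length k
def cycChars (clean : List Char) : Nat → Nat → List Char
  | _, 0 => []
  | i, k + 1 => clean.getD (i % clean.length) default :: cycChars clean (i + 1) k

theorem cycChars_length (clean : List Char) : ∀ k i, (cycChars clean i k).length = k := by
  intro k
  induction k with
  | zero => intro i; rfl
  | succ k ih => intro i; simp [cycChars, ih]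

theorem loopA_eq_cyc (clean : List Char) (length : Int) :
    ∀ (fuel : Nat) (out : List Char) (i : Nat),
      (length - out.length).toNat ≤ fuel →
      extendKeyLoopA clean length fuel out i = out ++ cycChars clean i (length - out.length).toNat := by
  intro fuel
  induction fuel with
  | zero =>
    intro out i h
    have : (length - out.length).toNat = 0 := Nat.le_zero.mp h
    simp [extendKeyLoopA, this, cycChars]
  | succ fuel ih =>
    intro out i h
    by_cases hg : (out.length : Int) < length
    · have hk : (length - out.length).toNat = ((length - (out.length + 1)).toNat) + 1 := by omega
      have h' : (length - ((out ++ [clean.getD (i % clean.length) default]).length : Int)).toNat ≤ fuel := by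
        simp only [List.length_append, List.length_cons, List.length_nil]
        push_cast
        omega
      have := ih (out ++ [clean.getD (i % clean.length) default]) (i + 1) h'
      simp only [extendKeyLoopA, if_pos hg, this]
      rw [hk]
      simp [cycChars]
    · have : (length - out.length).toNat = 0 := by omega
      simp [extendKeyLoopA, if_neg hg, this, cycChars]

theorem cycChars_mod (clean : List Char) : ∀ k i, cycChars clean i k = cycChars clean (i % clean.length) k := by
  intro k
  induction k with
  | zero => intro i; rfl
  | succ k ih =>
    intro i
    simp only [cycChars, Nat.mod_mod_of_dvd i (dvd_refl clean.length)]
    rw [ih (i + 1), ih (i % clean.length + 1), Nat.add_mod i 1, Nat.add_mod (i % clean.length) 1,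
      Nat.mod_mod_of_dvd i (dvd_refl clean.length)]

theorem cycChars_add (clean : List Char) : ∀ a b i, cycChars clean i (a + b) = cycChars clean i a ++ cycChars clean (i + a) b := by
  intro a
  induction a with
  | zero => intro b i; simp [cycChars]
  | succ a ih =>
    intro b i
    have : a + 1 + b = (a + b) + 1 := by omega
    rw [this]
    simp only [cycChars, ih]
    have : i + (a + 1) = (i + 1) + a := by omega
    simp [this]

theorem cycChars_slice (clean : List Char) : ∀ k i, i + k ≤ clean.length → cycChars clean i k = (clean.drop i).take k := by
  intro k
  induction k with
  | zero => intro i _; simp [cycChars]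
  | succ k ih =>
    intro i h
    have hi : i < clean.length := by omega
    have hd : clean.drop i = clean[i] :: clean.drop (i + 1) := List.drop_eq_getElem_cons hi
    simp only [cycChars, Nat.mod_eq_of_lt hi, List.getD_eq_getElem _ _ hi, ih (i+1) (by omega), hd,
      List.take_succ_cons]

theorem cycChars_full (clean : List Char) :
    ∀ m, cycChars clean 0 (clean.length * m) = (List.replicate m clean).flatten := by
  intro m
  induction m with
  | zero => simp [cycChars]
  | succ m ih =>
    have : clean.length * (m + 1) = clean.length + clean.length * m := by ring
    rw [this, cycChars_add, cycChars_slice clean clean.length 0 (by omega)]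
    rw [Nat.zero_add, cycChars_mod, Nat.mod_self, ih]
    simp [List.replicate_succ]

theorem cycChars_prefix (clean : List Char) (n m : Nat) (hm : n ≤ clean.length * m) :
    cycChars clean 0 n = ((List.replicate m clean).flatten).take n := by
  have h1 : clean.length * m = n + (clean.length * m - n) := by omega
  have := cycChars_full clean m
  rw [h1, cycChars_add] at this
  rw [← this, List.take_append_of_le_length (by rw [cycChars_length]),
    List.take_of_length_le (by rw [cycChars_length])]

theorem extend_key_spec : Claim_equal_extend_key := by
  intro key length _ hpre
  unfold Spec_extend_key extend_key extend_key_alt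
  set clean := (PySem.Str.lower key).toList.filter PySem.Chars.isalpha with hclean
  by_cases hl : length ≤ 0
  · have h0 : length.toNat = 0 := Int.toNat_of_nonpos hl
    simp [h0, extendKeyLoopA, hl]
  · replace hl : 0 < length := by omega
    have hne : clean ≠ [] := by
      rcases hpre with h | h
      · exact absurd h (by omega)
      · exact h
    have hL : 0 < (clean.length : Int) := by
      have : 0 < clean.length := List.length_pos_of_ne_nil hne
      exact_mod_cast this
    simp only [if_neg (by omega : ¬ length ≤ 0)]
    rw [loopA_eq_cyc clean length length.toNat [] 0 (by simp)]
    set reps := -(PySem.Int.floordiv (-length) (clean.length : Int)) with hreps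
    have hfd : PySem.Int.floordiv (-length) (clean.length : Int) = (-length) / (clean.length : Int) :=
      PySem.Int.floordiv_eq_ediv_of_pos hL
    have hle : length ≤ reps * (clean.length : Int) := by
      have := Int.ediv_mul_le (-length) (ne_of_gt hL)
      rw [hreps, hfd]; linarith
    have hrpos : 0 ≤ reps := by
      by_contra hneg
      have : reps * (clean.length : Int) ≤ 0 :=
        mul_nonpos_of_nonpos_of_nonneg (by omega) (le_of_lt hL)
      omega
    have hcast : ((clean.length * reps.toNat : Nat) : Int) = (clean.length : Int) * reps := by
      push_cast [Int.toNat_of_nonneg hrpos]; ring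
    have hmn : length.toNat ≤ clean.length * reps.toNat := by
      apply Int.toNat_le.mpr
      rw [hcast]; linarith
    rw [PySem.List.slice_to _ (le_of_lt hl)]
    simp only [List.nil_append, List.length_nil, Int.natCast_zero, sub_zero]
    rw [cycChars_prefix clean length.toNat reps.toNat hmn]
    simp [PySem.List.pyRepeat]
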